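-- pv_equiv track=rewrite | github.com/boxed/mutmut | src/mutmut/ui/helpers.py | expand_changed_functions
-- ===== SOURCE A (Python) =====
-- def expand_changed_functions(changed: set[str], deps: dict[str, set[str]]) -> set[str]:
--     """Transitively expand changed functions to include all callers.
--
--     Given a set of directly changed functions, walks backwards through the
--     dependency graph to find all functions that transitively depend on them.
--
--     Example: If baz() changed and the call chain is test -> foo -> bar -> baz,
--     this returns {'baz', 'bar', 'foo', 'test'} (all functions whose behavior
--     depends on baz).
--
--     Args:
--         changed: Set of function names (mangled) that have directly changed
--         deps: Dependency graph mapping callee -> set of callers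
--
--     Returns:
--         Expanded set including all callers that transitively depend on changed functions
--             (including the originally changed functions).
--     """
--     result = set(changed)
--     queue = list(changed)
--
--     while queue:
--         func = queue.pop()
--         callers = deps.get(func, set())
--         for caller in callers:
--             if caller not in result:
--                 result.add(caller)
--                 queue.append(caller)
--     return result
-- ===== SOURCE B (Python) =====
-- def expand_changed_functions(changed: set[str], deps: dict[str, set[str]]) -> set[str]:
--     """Recursive-DFS re-implementation: a nested visit() marks the not-yet-seen
--     callers of a function (set difference) and recurses into each of them."""
--     result = set(changed)
--
--     def visit(func):
--         new = deps.get(func, set()) - result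
--         result.update(new)
--         for caller in new:
--             visit(caller)
--
--     for func in changed:
--         visit(func)
--     return result
-- ===== Notes on version B (the rewrite author's own statement) =====
-- stated objective: alternative
-- what changed: Replaces the iterative worklist loop (explicit queue with pop/append and per-element membership checks) by a recursive depth-first traversal: a nested visit() computes the unseen callers of one function by set difference, marks them all at once, and recurses into each.
import Mathlib
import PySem

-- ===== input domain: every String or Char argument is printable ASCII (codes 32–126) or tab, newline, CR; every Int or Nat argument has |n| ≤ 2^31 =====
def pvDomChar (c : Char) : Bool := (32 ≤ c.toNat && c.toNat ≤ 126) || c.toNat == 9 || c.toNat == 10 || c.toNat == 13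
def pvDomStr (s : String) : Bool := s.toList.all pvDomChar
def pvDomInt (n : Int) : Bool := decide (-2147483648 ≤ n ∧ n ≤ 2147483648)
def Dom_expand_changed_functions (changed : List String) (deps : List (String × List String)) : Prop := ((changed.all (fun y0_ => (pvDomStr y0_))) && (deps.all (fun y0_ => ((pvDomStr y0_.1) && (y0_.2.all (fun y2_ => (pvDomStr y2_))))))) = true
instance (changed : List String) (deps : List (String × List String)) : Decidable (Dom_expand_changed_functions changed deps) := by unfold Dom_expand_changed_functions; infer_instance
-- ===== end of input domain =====

-- B replaces A's iterative worklist loop by a recursive depth-first traversal (same cost, different decomposition);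
-- Python-set iteration order is unobservable in the return value (a set), so each port fixes one concrete order.

-- ===== PORT A =====
-- one step of A's inner `for caller in callers: if caller not in result: …` loop over the state (result, queue)
def stepA (rq : List String × List String) (c : String) : List String × List String :=
  if PySem.Set.contains rq.1 c then rq else (PySem.Set.add rq.1 c, rq.2 ++ [c])

-- the elements A's inner loop newly adds (in order) when the result set is `res`
def newList (res : List String) : List String → List String
  | [] => []
  | c :: cs => if res.contains c then newList res cs else c :: newList (res ++ [c]) cs

-- loop variant of A's while-loop: how many potential callers are not yet in `res`
def pvMu (deps : List (String × List String)) (res : List String) : Nat :=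
  ((PySem.Set.ofList (deps.flatMap Prod.snd)).filter (fun x => !res.contains x)).length

theorem foldl_stepA (cs : List String) (res q : List String) :
    cs.foldl stepA (res, q) = (res ++ newList res cs, q ++ newList res cs) := by
  induction cs generalizing res q with
  | nil => simp [newList]
  | cons c cs ih =>
    by_cases hc : c ∈ res
    · simp [stepA, PySem.Set.contains, List.contains_eq_mem, newList, hc, ih]
    · simp [stepA, PySem.Set.contains, PySem.Set.add, List.contains_eq_mem, newList, hc, ih]

theorem mem_newList {x : String} {res cs : List String} (h : x ∈ newList res cs) :
    x ∉ res ∧ x ∈ cs := by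
  induction cs generalizing res with
  | nil => simp [newList] at h
  | cons c cs ih =>
    by_cases hc : c ∈ res
    · rw [newList, if_pos (by simpa [List.contains_eq_mem] using hc)] at h
      obtain ⟨h1, h2⟩ := ih h; exact ⟨h1, by simp [h2]⟩
    · rw [newList, if_neg (by simpa [List.contains_eq_mem] using hc)] at h
      rcases List.mem_cons.mp h with rfl | h
      · exact ⟨hc, by simp⟩
      · obtain ⟨h1, h2⟩ := ih h
        simp only [List.mem_append, not_or] at h1
        exact ⟨h1.1, by simp [h2]⟩

theorem nodup_newList (res cs : List String) : (newList res cs).Nodup := by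
  induction cs generalizing res with
  | nil => simp [newList]
  | cons c cs ih =>
    by_cases hc : c ∈ res
    · rw [newList, if_pos (by simpa [List.contains_eq_mem] using hc)]
      exact ih res
    · rw [newList, if_neg (by simpa [List.contains_eq_mem] using hc)]
      refine List.nodup_cons.mpr ⟨fun hmem => ?_, ih (res ++ [c])⟩
      have := (mem_newList hmem).1
      simp at this

theorem mem_getD_flatMap {deps : List (String × List String)} {f x : String}
    (h : x ∈ PySem.Dict.getD ⟨deps⟩ f []) : x ∈ deps.flatMap Prod.snd := by
  unfold PySem.Dict.getD at h
  cases hg : PySem.Dict.get? ⟨deps⟩ f with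
  | none => rw [hg] at h; simp at h
  | some v =>
    rw [hg] at h
    simp only [Option.getD_some] at h
    unfold PySem.Dict.get? at hg
    cases hf : List.find? (fun p => p.1 == f) (PySem.Dict.items ⟨deps⟩) with
    | none => rw [hf] at hg; simp at hg
    | some pr =>
      rw [hf] at hg
      simp only [Option.map_some] at hg
      have hmem : pr ∈ PySem.Dict.items ⟨deps⟩ := List.mem_of_find?_eq_some hf
      have : pr ∈ deps := by simpa [PySem.Dict.items] using hmem
      exact List.mem_flatMap.mpr ⟨pr, this, by rw [Option.some.inj hg]; exact h⟩

theorem pvMu_step (deps : List (String × List String)) (res cs : List String)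
    (hcs : ∀ x ∈ cs, x ∈ deps.flatMap Prod.snd) :
    pvMu deps (res ++ newList res cs) + (newList res cs).length = pvMu deps res := by
  have hnd : (PySem.Set.ofList (deps.flatMap Prod.snd)).Nodup := PySem.Set.nodup_ofList _
  set U := PySem.Set.ofList (deps.flatMap Prod.snd) with hUdef
  set δ := newList res cs with hδdef
  have hδU : ∀ x ∈ δ, x ∈ U := fun x hx => (PySem.Set.mem_ofList _ _).mpr (hcs x (mem_newList hx).2)
  have hδres : ∀ x ∈ δ, x ∉ res := fun x hx => (mem_newList hx).1
  have hδnd : δ.Nodup := nodup_newList res cs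
  have hsplit : U.filter (fun x => !(res ++ δ).contains x)
      = (U.filter (fun x => !res.contains x)).filter (fun x => !δ.contains x) := by
    rw [List.filter_filter]
    apply List.filter_congr
    intro x _
    simp only [List.contains_append, Bool.not_or]
    exact Bool.and_comm _ _
  set A := U.filter (fun x => !res.contains x) with hAdef
  have hAnd : A.Nodup := hnd.filter _
  have hlen : (A.filter (fun x => δ.contains x)).length = δ.length := by
    have h1 : (A.filter (fun x => δ.contains x)).Nodup := hAnd.filter _
    refine ((List.perm_ext_iff_of_nodup h1 hδnd).mpr ?_).length_eq
    intro x
    simp only [List.mem_filter, hAdef, List.contains_eq_mem, decide_eq_true_eq, Bool.not_eq_eq_eq_not,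
      Bool.not_true, decide_eq_false_iff_not]
    constructor
    · rintro ⟨_, hx⟩; exact hx
    · intro hx; exact ⟨⟨hδU x hx, hδres x hx⟩, hx⟩
  have hsum : A.length = (A.filter (fun x => δ.contains x)).length + (A.filter (fun x => !δ.contains x)).length :=
    List.length_eq_length_filter_add _
  show (U.filter (fun x => !(res ++ δ).contains x)).length + δ.length = (U.filter (fun x => !res.contains x)).length
  rw [hsplit, ← hAdef]
  omega

def loopA (deps : List (String × List String)) (res queue : List String) : List String :=
  if h : queue = [] then res
  else
    let p := (PySem.Dict.getD ⟨deps⟩ (queue.getLast h) []).foldl stepA (res, queue.dropLast)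
    loopA deps p.1 p.2
  termination_by pvMu deps res + queue.length
  decreasing_by
    simp only [foldl_stepA]
    have hkey := pvMu_step deps res (PySem.Dict.getD ⟨deps⟩ (queue.getLast h) [])
      (fun x hx => mem_getD_flatMap hx)
    have hlen : queue.dropLast.length + 1 = queue.length := by
      cases queue with
      | nil => exact absurd rfl h
      | cons a l => simp
    simp only [List.length_append]
    omega

def expand_changed_functions (changed : List String) (deps : List (String × List String)) : List String :=
  loopA deps (PySem.Set.ofList changed) changed

-- ===== PORT B =====
-- `visit` from Source B; the recursion is guarded by fuel (a bound on the recursion depth,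
-- proved sufficient below); iteration over the Python set `new` is realized in reversed stored order
-- (Python set iteration order is unspecified and unobservable in the returned set).
def visitB (deps : List (String × List String)) : Nat → List String → String → List String
  | 0, res, _ => res
  | n + 1, res, f =>
    let new := PySem.Set.diff (PySem.Set.ofList (PySem.Dict.getD ⟨deps⟩ f [])) res
    new.reverse.foldl (visitB deps n) (PySem.Set.union res new)

def expand_changed_functions_alt (changed : List String) (deps : List (String × List String)) : List String :=
  changed.reverse.foldl
    (visitB deps ((PySem.Set.ofList (deps.flatMap Prod.snd)).length + 1))
    (PySem.Set.ofList changed)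

-- ===== PRECONDITION & SPEC =====
def Spec_expand_changed_functions (changed : List String) (deps : List (String × List String)) (out : List String) : Prop := out = expand_changed_functions_alt changed deps
instance (changed : List String) (deps : List (String × List String)) (out : List String) : Decidable (Spec_expand_changed_functions changed deps out) := by unfold Spec_expand_changed_functions; infer_instance

-- ===== CLAIM (what is proved, stated in full; the proofs are below) =====
def Claim_equal_expand_changed_functions : Prop := ∀ (changed : List String) (deps : List (String × List String)), Dom_expand_changed_functions changed deps → Spec_expand_changed_functions changed deps (expand_changed_functions changed deps)

-- ===== LEMMAS AND PROOFS =====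

theorem loopA_nil (deps : List (String × List String)) (res : List String) :
    loopA deps res [] = res := by
  rw [loopA]; simp

theorem loopA_concat (deps : List (String × List String)) (res q : List String) (f : String) :
    loopA deps res (q ++ [f]) =
      loopA deps (res ++ newList res (PySem.Dict.getD ⟨deps⟩ f []))
        (q ++ newList res (PySem.Dict.getD ⟨deps⟩ f [])) := by
  rw [loopA]
  simp [foldl_stepA]

theorem foldl_add_eq_append_newList (cs a : List String) :
    cs.foldl PySem.Set.add a = a ++ newList a cs := by
  induction cs generalizing a with
  | nil => simp [newList]
  | cons c cs ih =>
    by_cases hc : c ∈ a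
    · simp [PySem.Set.add, PySem.Set.contains, List.contains_eq_mem, newList, hc, ih]
    · simp [PySem.Set.add, PySem.Set.contains, List.contains_eq_mem, newList, hc, ih]

theorem ofList_eq_newList (cs : List String) :
    PySem.Set.ofList cs = newList [] cs := by
  have := foldl_add_eq_append_newList cs []
  simpa [PySem.Set.ofList, PySem.Set.empty] using this

theorem newList_filter (cs : List String) (res res' : List String)
    (hsub : ∀ x, x ∈ res' → x ∈ res) :
    newList res cs = (newList res' cs).filter (fun x => !res.contains x) := by
  induction cs generalizing res res' with
  | nil => simp [newList]
  | cons c cs ih =>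
    by_cases hc : c ∈ res
    · rw [newList, if_pos (by simpa [List.contains_eq_mem] using hc)]
      by_cases hc' : c ∈ res'
      · rw [newList, if_pos (by simpa [List.contains_eq_mem] using hc')]
        exact ih res res' hsub
      · rw [newList, if_neg (by simpa [List.contains_eq_mem] using hc'),
          List.filter_cons_of_neg (by simpa [List.contains_eq_mem] using hc)]
        refine ih res (res' ++ [c]) ?_
        intro x hx
        rcases List.mem_append.mp hx with h | h
        · exact hsub x h
        · simp only [List.mem_singleton] at h
          exact h ▸ hc
    · have hc' : c ∉ res' := fun h => hc (hsub c h)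
      rw [newList, if_neg (by simpa [List.contains_eq_mem] using hc),
        newList, if_neg (by simpa [List.contains_eq_mem] using hc'),
        List.filter_cons_of_pos (by simpa [List.contains_eq_mem] using hc)]
      congr 1
      have hsub2 : ∀ x, x ∈ res' ++ [c] → x ∈ res ++ [c] := by
        intro x hx
        rcases List.mem_append.mp hx with h | h
        · exact List.mem_append.mpr (Or.inl (hsub x h))
        · exact List.mem_append.mpr (Or.inr h)
      rw [ih (res ++ [c]) (res' ++ [c]) hsub2]
      apply List.filter_congr
      intro x hx
      have hxc : x ≠ c := by
        have := (mem_newList hx).1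
        intro hEq
        exact this (by simp [hEq])
      simp [List.contains_eq_mem, List.mem_append, hxc]

theorem newList_of_disjoint (δ res : List String)
    (hdis : ∀ x ∈ δ, x ∉ res) (hnd : δ.Nodup) : newList res δ = δ := by
  induction δ generalizing res with
  | nil => simp [newList]
  | cons c δ ih =>
    rw [newList, if_neg (by simpa [List.contains_eq_mem] using hdis c (by simp))]
    congr 1
    refine ih (res ++ [c]) (fun x hx => ?_) (List.nodup_cons.mp hnd).2
    have h1 : x ∉ res := hdis x (by simp [hx])
    have h2 : x ≠ c := by rintro rfl; exact (List.nodup_cons.mp hnd).1 hx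
    simp [List.mem_append, h1, h2]

theorem diff_ofList_eq_newList (cs res : List String) :
    PySem.Set.diff (PySem.Set.ofList cs) res = newList res cs := by
  show (PySem.Set.ofList cs).filter (fun x => !(PySem.Set.contains res x)) = newList res cs
  rw [ofList_eq_newList]
  exact (newList_filter cs res [] (by simp)).symm

theorem union_newList (res cs : List String) :
    PySem.Set.union res (newList res cs) = res ++ newList res cs := by
  show (newList res cs).foldl PySem.Set.add res = res ++ newList res cs
  rw [foldl_add_eq_append_newList]
  rw [newList_of_disjoint (newList res cs) res (fun x hx => (mem_newList hx).1) (nodup_newList res cs)]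

theorem visitB_succ (deps : List (String × List String)) (n : Nat) (res : List String) (f : String) :
    visitB deps (n + 1) res f =
      (newList res (PySem.Dict.getD ⟨deps⟩ f [])).reverse.foldl (visitB deps n)
        (res ++ newList res (PySem.Dict.getD ⟨deps⟩ f [])) := by
  show (PySem.Set.diff (PySem.Set.ofList (PySem.Dict.getD ⟨deps⟩ f [])) res).reverse.foldl (visitB deps n)
      (PySem.Set.union res (PySem.Set.diff (PySem.Set.ofList (PySem.Dict.getD ⟨deps⟩ f [])) res)) = _
  rw [diff_ofList_eq_newList, union_newList]

theorem foldl_append_of {g : List String → String → List String}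
    (H : ∀ res f, ∃ e, g res f = res ++ e) :
    ∀ (fs : List String) (res : List String), ∃ e, fs.foldl g res = res ++ e := by
  intro fs
  induction fs with
  | nil => intro res; exact ⟨[], by simp⟩
  | cons c fs ih =>
    intro res
    obtain ⟨e1, he1⟩ := H res c
    obtain ⟨e2, he2⟩ := ih (res ++ e1)
    exact ⟨e1 ++ e2, by simp [List.foldl_cons, he1, he2]⟩

theorem visitB_append (deps : List (String × List String)) :
    ∀ (n : Nat) (res : List String) (f : String), ∃ e, visitB deps n res f = res ++ e := by
  intro n
  induction n with
  | zero => exact fun res f => ⟨[], by simp [visitB]⟩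
  | succ n ih =>
    intro res f
    rw [visitB_succ]
    obtain ⟨e, he⟩ := foldl_append_of ih
      (newList res (PySem.Dict.getD ⟨deps⟩ f [])).reverse
      (res ++ newList res (PySem.Dict.getD ⟨deps⟩ f []))
    exact ⟨newList res (PySem.Dict.getD ⟨deps⟩ f []) ++ e, by rw [he, List.append_assoc]⟩

theorem pvMu_append_le (deps : List (String × List String)) (res e : List String) :
    pvMu deps (res ++ e) ≤ pvMu deps res := by
  unfold pvMu
  have hsplit : (PySem.Set.ofList (deps.flatMap Prod.snd)).filter (fun x => !(res ++ e).contains x)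
      = ((PySem.Set.ofList (deps.flatMap Prod.snd)).filter (fun x => !res.contains x)).filter
          (fun x => !e.contains x) := by
    rw [List.filter_filter]
    apply List.filter_congr
    intro x _
    simp only [List.contains_append, Bool.not_or]
    exact Bool.and_comm _ _
  rw [hsplit]
  exact List.length_filter_le _ _

theorem foldl_visitB_irr (deps : List (String × List String)) :
    ∀ (k : Nat) (fs res : List String) (n m : Nat), pvMu deps res ≤ k →
      pvMu deps res < n → pvMu deps res < m →
      fs.foldl (visitB deps n) res = fs.foldl (visitB deps m) res := by
  intro k
  induction k using Nat.strong_induction_on with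
  | _ k IHk =>
    intro fs
    induction fs with
    | nil => intro res n m _ _ _; rfl
    | cons c fs IHfs =>
      intro res n m hk hn hm
      obtain ⟨n', rfl⟩ : ∃ n', n = n' + 1 := ⟨n - 1, by omega⟩
      obtain ⟨m', rfl⟩ : ∃ m', m = m' + 1 := ⟨m - 1, by omega⟩
      have hv : visitB deps (n' + 1) res c = visitB deps (m' + 1) res c := by
        rw [visitB_succ, visitB_succ]
        set δ := newList res (PySem.Dict.getD ⟨deps⟩ c []) with hδ
        rcases eq_or_ne δ [] with hnil | hne
        · rw [hnil]; rfl
        · have hkey := pvMu_step deps res (PySem.Dict.getD ⟨deps⟩ c [])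
            (fun x hx => mem_getD_flatMap hx)
          rw [← hδ] at hkey
          have hlen : 0 < δ.length := List.length_pos_iff.mpr hne
          exact IHk (pvMu deps (res ++ δ)) (by omega) δ.reverse (res ++ δ) n' m' le_rfl
            (by omega) (by omega)
      simp only [List.foldl_cons]
      rw [hv]
      obtain ⟨e, he⟩ := visitB_append deps (m' + 1) res c
      have hμ2 : pvMu deps (visitB deps (m' + 1) res c) ≤ pvMu deps res := by
        rw [he]; exact pvMu_append_le deps res e
      exact IHfs (visitB deps (m' + 1) res c) (n' + 1) (m' + 1) (le_trans hμ2 hk)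
        (lt_of_le_of_lt hμ2 hn) (lt_of_le_of_lt hμ2 hm)

theorem bridge (deps : List (String × List String)) :
    ∀ (k : Nat) (queue res : List String) (n : Nat),
      pvMu deps res + queue.length ≤ k → pvMu deps res < n →
      loopA deps res queue = queue.reverse.foldl (visitB deps n) res := by
  intro k
  induction k using Nat.strong_induction_on with
  | _ k IHk =>
    intro queue res n hk hn
    rcases List.eq_nil_or_concat queue with rfl | ⟨q, f, rfl⟩
    · simpa using loopA_nil deps res
    · simp only [List.concat_eq_append] at hk ⊢
      rw [loopA_concat]
      set δ := newList res (PySem.Dict.getD ⟨deps⟩ f []) with hδ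
      have hkey := pvMu_step deps res (PySem.Dict.getD ⟨deps⟩ f [])
        (fun x hx => mem_getD_flatMap hx)
      rw [← hδ] at hkey
      simp only [List.length_append, List.length_singleton] at hk
      have hIH := IHk (k - 1) (by omega) (q ++ δ) (res ++ δ) n
        (by simp only [List.length_append]; omega) (by omega)
      rw [hIH]
      rw [List.reverse_append, List.reverse_append, List.foldl_append, List.foldl_append]
      simp only [List.reverse_singleton, List.foldl_cons, List.foldl_nil]
      congr 1
      obtain ⟨n', rfl⟩ : ∃ n', n = n' + 1 := ⟨n - 1, by omega⟩
      rw [visitB_succ, ← hδ]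
      rcases eq_or_ne δ [] with hnil | hne
      · rw [hnil]; rfl
      · have hlen : 0 < δ.length := List.length_pos_iff.mpr hne
        exact foldl_visitB_irr deps (pvMu deps (res ++ δ)) δ.reverse (res ++ δ) (n' + 1) n'
          le_rfl (by omega) (by omega)

-- ===== VERDICT (by name: the statement is the Claim_ definition above) =====
theorem expand_changed_functions_spec : Claim_equal_expand_changed_functions := by
  unfold Claim_equal_expand_changed_functions
  intro changed deps _
  unfold Spec_expand_changed_functions expand_changed_functions expand_changed_functions_alt
  apply bridge deps (pvMu deps (PySem.Set.ofList changed) + changed.length)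
  · exact le_refl _
  · have : pvMu deps (PySem.Set.ofList changed) ≤ (PySem.Set.ofList (deps.flatMap Prod.snd)).length :=
      List.length_filter_le _ _
    omega
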